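-- pv_equiv track=rewrite | github.com/OSCC-Project/iPCL-R | flow/utils/token_preprocessing.py | split_decimal_token
-- ===== SOURCE A (Python) =====
-- from typing import List, Optional, Tuple, Union
--
-- def split_decimal_token(prefix: str, value: int) -> List[str]:
--     """
--     Split decimal number into components (from dataset_generation/preparator.py).
--
--     Args:
--         prefix: Direction prefix (R, L, U, D, T, B)
--         value: Distance value to decompose
--
--     Returns:
--         List of decimal component tokens
--     """
--     if value <= 10:
--         return [f"{prefix}{value}"]
--
--     s = str(value)
--     n = len(s)
--     toks = []
--     for i, ch in enumerate(s):
--         d = int(ch)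
--         if d == 0:
--             continue
--         place = 10 ** (n - i - 1)
--         toks.append(f"{prefix}{d * place}")
--     return toks
-- ===== SOURCE B (Python) =====
-- def split_decimal_token(prefix: str, value: int):
--     """Decompose a decimal distance into place-value tokens, extracting
--     digits arithmetically from the least significant end (no string pass)."""
--     if value <= 10:
--         return [f"{prefix}{value}"]
--
--     toks = []
--     place = 1
--     while value > 0:
--         d = value % 10
--         if d != 0:
--             toks.append(f"{prefix}{d * place}")
--         value //= 10
--         place *= 10
--     toks.reverse()
--     return toks
-- ===== Notes on version B (the rewrite author's own statement) =====
-- stated objective: alternative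
-- what changed: B extracts digits arithmetically (value % 10, value //= 10, running place multiplier) from the least significant end and reverses the collected tokens, instead of A's conversion to a string and indexed character scan with 10**(n-i-1) places.
import Mathlib
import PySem

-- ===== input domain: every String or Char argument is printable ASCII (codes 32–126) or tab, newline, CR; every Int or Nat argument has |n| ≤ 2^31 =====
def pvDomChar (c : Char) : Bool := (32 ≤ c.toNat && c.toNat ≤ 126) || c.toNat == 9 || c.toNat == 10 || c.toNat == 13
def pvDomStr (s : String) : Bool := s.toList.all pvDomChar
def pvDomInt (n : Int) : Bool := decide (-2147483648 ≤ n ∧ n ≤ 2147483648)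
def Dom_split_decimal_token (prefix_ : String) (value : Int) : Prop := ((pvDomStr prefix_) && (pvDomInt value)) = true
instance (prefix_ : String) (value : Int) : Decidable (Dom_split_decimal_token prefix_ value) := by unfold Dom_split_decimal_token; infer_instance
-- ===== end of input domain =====

-- B replaces A's string-index digit scan by arithmetic digit extraction (value % 10, value //= 10,
-- running place multiplier) with a final reverse; alternative decomposition, same results.


-- ===== PORT A =====
-- Literal port of A. The string s = str(value) is handled on the List Char side
-- (PySem.Int.toChars; exact by PySem.Int.toList_toStr). In the loop value ≥ 11, so every
-- ch is a decimal digit and int(ch) = (PySem.Int.ofChars? [ch]).getD 0 never hits the default;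
-- the exponent n - i - 1 is nonnegative (i < n), so .toNat on it is exact.
def split_decimal_token (prefix_ : String) (value : Int) : List String :=
  if value ≤ 10 then [prefix_ ++ PySem.Int.toStr value]
  else
    let s : List Char := PySem.Int.toChars value
    let n : Int := s.length
    (PySem.List.enumerate s 0).foldl
      (fun toks p =>
        let d : Int := (PySem.Int.ofChars? [p.2]).getD 0
        if d = 0 then toks
        else toks ++ [prefix_ ++ PySem.Int.toStr (d * 10 ^ (n - p.1 - 1).toNat)]) []

-- ===== PORT B =====
-- the while-loop of Source B: d = value % 10; append when d != 0; value //= 10; place *= 10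
def sdtLoop (prefix_ : String) (value place : Int) (toks : List String) : List String :=
  if 0 < value then
    let d := PySem.Int.mod value 10
    sdtLoop prefix_ (PySem.Int.floordiv value 10) (place * 10)
      (if d ≠ 0 then toks ++ [prefix_ ++ PySem.Int.toStr (d * place)] else toks)
  else toks
termination_by value.toNat
decreasing_by
  rw [PySem.Int.floordiv_eq_ediv_of_pos (by norm_num : (0:Int) < 10)]
  omega

def split_decimal_token_alt (prefix_ : String) (value : Int) : List String :=
  if value ≤ 10 then [prefix_ ++ PySem.Int.toStr value]
  else (sdtLoop prefix_ value 1 []).reverse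

-- ===== PRECONDITION & SPEC =====
def Spec_split_decimal_token (prefix_ : String) (value : Int) (out : List String) : Prop := out = split_decimal_token_alt prefix_ value
instance (prefix_ : String) (value : Int) (out : List String) : Decidable (Spec_split_decimal_token prefix_ value out) := by unfold Spec_split_decimal_token; infer_instance

-- ===== CLAIM (what is proved, stated in full; the proofs are below) =====
def Claim_equal_split_decimal_token : Prop := ∀ (prefix_ : String) (value : Int), Dom_split_decimal_token prefix_ value → Spec_split_decimal_token prefix_ value (split_decimal_token prefix_ value)

-- ===== LEMMAS AND PROOFS =====

-- tokens produced from a least-significant-first digit list, in production (LSF) order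
def toksRev (prefix_ : String) (ds : List Nat) (place : Int) : List String :=
  match ds with
  | [] => []
  | d :: tl =>
      (if d ≠ 0 then [prefix_ ++ PySem.Int.toStr (↑d * place)] else []) ++
        toksRev prefix_ tl (place * 10)

-- tokens from a most-significant-first digit list, with place factor
def toksMS (prefix_ : String) (rds : List Nat) (place : Int) : List String :=
  match rds with
  | [] => []
  | d :: tl =>
      (if d = 0 then [] else [prefix_ ++ PySem.Int.toStr (↑d * (place * 10 ^ tl.length))]) ++
        toksMS prefix_ tl place

lemma ofChars_digitChar (d : Nat) (hd : d < 10) :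
    (PySem.Int.ofChars? [Nat.digitChar d]).getD 0 = (d : Int) := by
  interval_cases d <;> decide

lemma toksMS_snoc (prefix_ : String) (rds : List Nat) (d : Nat) (place : Int) :
    toksMS prefix_ (rds ++ [d]) place =
      toksMS prefix_ rds (place * 10) ++
        (if d = 0 then [] else [prefix_ ++ PySem.Int.toStr (↑d * place)]) := by
  induction rds generalizing place with
  | nil => simp [toksMS]
  | cons d' tl ih =>
      simp only [List.cons_append, toksMS, List.length_append, List.length_cons,
        List.length_nil, ih, List.append_assoc]
      congr 2
      ring_nf

lemma toksRev_reverse (prefix_ : String) (ds : List Nat) (place : Int) :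
    (toksRev prefix_ ds place).reverse = toksMS prefix_ ds.reverse place := by
  induction ds generalizing place with
  | nil => simp [toksRev, toksMS]
  | cons d tl ih =>
      simp only [toksRev, List.reverse_append, List.reverse_cons, ih, toksMS_snoc]
      by_cases h : d = 0 <;> simp [h]

lemma sdtLoop_eq (prefix_ : String) (m : Nat) (place : Int) (acc : List String) :
    sdtLoop prefix_ (m : Int) place acc = acc ++ toksRev prefix_ (Nat.digits 10 m) place := by
  induction m using Nat.strong_induction_on generalizing place acc with
  | _ m ih =>
    rw [sdtLoop]
    by_cases hm : 0 < m
    · have hlt : m / 10 < m := Nat.div_lt_self hm (by norm_num)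
      rw [if_pos (by exact_mod_cast hm)]
      have hdig := Nat.digits_def' (b := 10) (by norm_num) hm
      have hmod : PySem.Int.mod (↑m) 10 = ((m % 10 : Nat) : Int) := by
        exact_mod_cast PySem.Int.mod_natCast m 10
      have hdiv : PySem.Int.floordiv (↑m) 10 = ((m / 10 : Nat) : Int) := by
        exact_mod_cast PySem.Int.floordiv_natCast m 10
      simp only [hmod, hdiv]
      rw [ih (m / 10) hlt, hdig]
      simp only [toksRev]
      by_cases h0 : m % 10 = 0
      · simp [h0]
      · rw [if_pos (by exact_mod_cast h0), if_pos (by exact_mod_cast h0)]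
        simp [List.append_assoc]
    · have hm0 : m = 0 := by omega
      subst hm0
      simp [toksRev]

-- A's fold over enumerate equals toksMS on the most-significant-first digit list
lemma foldA_eq (prefix_ : String) (rds : List Nat) (hds : ∀ d ∈ rds, d < 10) :
    ∀ (s0 n : Int) (acc : List String), n = s0 + rds.length →
    (PySem.List.enumerate (rds.map Nat.digitChar) s0).foldl
      (fun toks p =>
        let d : Int := (PySem.Int.ofChars? [p.2]).getD 0
        if d = 0 then toks
        else toks ++ [prefix_ ++ PySem.Int.toStr (d * 10 ^ (n - p.1 - 1).toNat)]) acc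
      = acc ++ toksMS prefix_ rds 1 := by
  induction rds with
  | nil => intro s0 n acc _; simp [toksMS, PySem.List.enumerate_nil]
  | cons d tl ih =>
      intro s0 n acc hn
      have hd : d < 10 := hds d (List.mem_cons_self ..)
      have htl : ∀ x ∈ tl, x < 10 := fun x hx => hds x (List.mem_cons_of_mem _ hx)
      simp only [List.map_cons, PySem.List.enumerate_cons, List.foldl_cons]
      have harg : (n - s0 - 1).toNat = tl.length := by
        simp only [List.length_cons] at hn; push_cast at hn; omega
      rw [ofChars_digitChar d hd,
        ih htl (s0 + 1) n _ (by simp only [List.length_cons] at hn; push_cast at hn ⊢; omega)]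
      by_cases h0 : d = 0
      · simp [h0, toksMS]
      · rw [if_neg (by exact_mod_cast h0)]
        simp [toksMS, h0, harg, List.append_assoc]

lemma toDigitsCore_eq_digits (fuel n : Nat) (ds : List Char) (hf : n < fuel) (hn : 0 < n) :
    Nat.toDigitsCore 10 fuel n ds = ((Nat.digits 10 n).map Nat.digitChar).reverse ++ ds := by
  induction fuel generalizing n ds with
  | zero => omega
  | succ f ih =>
      rw [Nat.toDigitsCore]
      have hdig := Nat.digits_def' (b := 10) (by norm_num) hn
      by_cases hq : n / 10 = 0
      · have hlt : n < 10 := by omega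
        rw [hdig, hq, Nat.digits_zero]
        simp
      · rw [if_neg hq, ih (n / 10) (Nat.digitChar (n % 10) :: ds)
            (by have := Nat.div_lt_self hn (by norm_num : 1 < 10); omega)
            (Nat.pos_of_ne_zero hq), hdig]
        simp

lemma toDigits_eq_digits (n : Nat) (hn : 0 < n) :
    Nat.toDigits 10 n = ((Nat.digits 10 n).map Nat.digitChar).reverse := by
  rw [Nat.toDigits, toDigitsCore_eq_digits (n + 1) n [] (by omega) hn, List.append_nil]

-- ===== VERDICT (by name: the statement is the Claim_ definition above) =====
theorem split_decimal_token_spec : Claim_equal_split_decimal_token := by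
  intro prefix_ value _
  unfold Spec_split_decimal_token split_decimal_token split_decimal_token_alt
  by_cases hle : value ≤ 10
  · simp [hle]
  · rw [if_neg hle, if_neg hle]
    have hpos : (0:Int) < value := by omega
    have hv : ((value.toNat : Int)) = value := Int.toNat_of_nonneg hpos.le
    have hmpos : 0 < value.toNat := by omega
    have hchars : PySem.Int.toChars value
        = ((Nat.digits 10 value.toNat).reverse).map Nat.digitChar := by
      rw [PySem.Int.toChars, if_neg (by omega), toDigits_eq_digits _ hmpos, List.map_reverse]
    rw [hchars, ← hv, sdtLoop_eq, List.nil_append, toksRev_reverse,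
      foldA_eq prefix_ _ (fun d hd => Nat.digits_lt_base (by norm_num)
        (List.mem_reverse.mp hd)) 0 _ [] (by simp), List.nil_append]
    simp only [Int.toNat_natCast]
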